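-- pv_equiv track=rewrite | github.com/DancingOnAir/LeetcodePythonSolution | DynamicProgramming/646_maximum_length_of_pair_chain.py | findLongestChain
-- ===== SOURCE A (Python) =====
-- from typing import List
--
-- def findLongestChain(pairs: List[List[int]]) -> int:
--     n = len(pairs)
--     if n < 2:
--         return n
--
--     pairs.sort()
--     dp = [1] + [0] * (n - 1)
--     for i in range(1, n):
--         for j in range(i):
--             dp[i] = max(dp[i], dp[j] + (pairs[j][1] < pairs[i][0]))
--     return dp[n - 1]
-- ===== SOURCE B (Python) =====
-- from typing import List
--
-- def findLongestChain(pairs: List[List[int]]) -> int: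
--     n = len(pairs)
--     if n < 2:
--         return n
--
--     def first_ge(frontier, x):
--         # index of the first entry whose end is >= x (ends strictly increase)
--         lo, hi = 0, len(frontier)
--         while lo < hi:
--             mid = (lo + hi) // 2
--             if frontier[mid][0] < x:
--                 lo = mid + 1
--             else:
--                 hi = mid
--         return lo
--
--     best = 0
--     frontier = []  # (end e, best chain length among seen pairs with end <= e);
--                    # ends strictly increasing, lengths nondecreasing
--     for p in sorted(pairs):
--         a, b = p[0], p[1]
--         i = first_ge(frontier, a)
--         q = frontier[i - 1][1] if i > 0 else 0
--         best = max(best, q + 1)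
--         del frontier[first_ge(frontier, b):]  # (b, best) dominates entries with end >= b
--         frontier.append((b, best))
--     return best
-- ===== Notes on version B (the rewrite author's own statement) =====
-- stated objective: faster
-- what changed: Replaces the O(n^2) dense DP table (for each i, re-scan all j<i) by a single pass over the sorted pairs that maintains a Pareto frontier of (end, chain-length) entries with strictly increasing ends and nondecreasing lengths, answering each 'best chain ending before a' query by hand-rolled binary search, giving O(n log n) overall.
-- outside the precondition, e.g. on findLongestChain([[1, 2], [3]]): A returns 2, B raises IndexError
import Mathlib
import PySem

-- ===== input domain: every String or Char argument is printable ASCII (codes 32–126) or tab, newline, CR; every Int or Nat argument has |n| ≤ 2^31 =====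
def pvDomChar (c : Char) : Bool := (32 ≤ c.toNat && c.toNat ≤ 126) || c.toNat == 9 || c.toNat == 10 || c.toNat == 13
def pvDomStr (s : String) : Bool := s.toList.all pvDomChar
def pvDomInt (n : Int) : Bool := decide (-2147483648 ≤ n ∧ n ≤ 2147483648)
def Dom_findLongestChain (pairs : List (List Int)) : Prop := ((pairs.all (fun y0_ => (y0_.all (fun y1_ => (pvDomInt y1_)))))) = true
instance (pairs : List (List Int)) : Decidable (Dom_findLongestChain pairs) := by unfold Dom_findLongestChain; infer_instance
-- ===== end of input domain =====

-- B replaces A's O(n^2) dense DP over the lexicographically sorted pairs by one pass that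
-- maintains a Pareto frontier of (end, chain length) entries queried by binary search.
-- Note: Python A sorts `pairs` in place (B does not mutate); the equivalence proved here is
-- about the return value only.

-- ===== PORT A =====
def findLongestChain (pairs : List (List Int)) : Int :=
  let n : Int := pairs.length
  if n < 2 then n
  else
    let ps := PySem.List.sorted pairs (fun x => x) false
    let dp0 : List Int := 1 :: List.replicate (pairs.length - 1) 0
    let dp := (PySem.List.pyRange 1 n).foldl (fun dp i =>
        (PySem.List.pyRange 0 i).foldl (fun dp j =>
          PySem.List.pySetD dp i (max (PySem.List.pyGetD dp i 0)
            (PySem.List.pyGetD dp j 0 +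
              (if PySem.List.pyGetD (PySem.List.pyGetD ps j []) 1 0 <
                  PySem.List.pyGetD (PySem.List.pyGetD ps i []) 0 0 then 1 else 0)))) dp) dp0
    PySem.List.pyGetD dp (n - 1) 0

-- ===== PORT B =====
-- hand-rolled binary search of Source B: first index whose entry's end is >= x
def firstGeAux (f : List (Int × Int)) (x : Int) (lo hi : Int) : Int :=
  if _h : lo < hi then
    let mid := PySem.Int.floordiv (lo + hi) 2
    if (PySem.List.pyGetD f mid (0, 0)).1 < x then firstGeAux f x (mid + 1) hi
    else firstGeAux f x lo mid
  else lo
termination_by (hi - lo).toNat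
decreasing_by
  all_goals
    rw [PySem.Int.floordiv_eq_ediv_of_pos (by omega : (0:Int) < 2)]
    omega

def firstGe (f : List (Int × Int)) (x : Int) : Int :=
  firstGeAux f x 0 f.length

def findLongestChain_alt (pairs : List (List Int)) : Int :=
  let n : Int := pairs.length
  if n < 2 then n
  else
    let ps := PySem.List.sorted pairs (fun x => x) false
    (ps.foldl (fun (st : Int × List (Int × Int)) p =>
        let a := PySem.List.pyGetD p 0 0
        let b := PySem.List.pyGetD p 1 0
        let i := firstGe st.2 a
        let q := if 0 < i then (PySem.List.pyGetD st.2 (i - 1) (0, 0)).2 else 0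
        let best := max st.1 (q + 1)
        (best, PySem.List.slice st.2 none (some (firstGe st.2 b)) ++ [(b, best)]))
      (0, [])).1

-- ===== PRECONDITION & SPEC =====
-- Pre_ excludes inputs with at least two rows where some row has fewer than 2 entries:
-- Python A raises IndexError on almost all of these (and where the lone short row happens to
-- sort last, A's return is an accident of which indices the DP reads); B raises IndexError there.
def Pre_findLongestChain (pairs : List (List Int)) : Prop :=
  pairs.length < 2 ∨ ∀ row ∈ pairs, 2 ≤ row.length
instance (pairs : List (List Int)) : Decidable (Pre_findLongestChain pairs) := by
  unfold Pre_findLongestChain; infer_instance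

def pvWitness_findLongestChain : List (List Int) := [[1, 2], [3, 4]]

def Spec_findLongestChain (pairs : List (List Int)) (out : Int) : Prop := out = findLongestChain_alt pairs
instance (pairs : List (List Int)) (out : Int) : Decidable (Spec_findLongestChain pairs out) := by unfold Spec_findLongestChain; infer_instance

-- ===== CLAIM (what is proved, stated in full; the proofs are below) =====
def Claim_equal_findLongestChain : Prop := ∀ (pairs : List (List Int)), Dom_findLongestChain pairs → Pre_findLongestChain pairs → Spec_findLongestChain pairs (findLongestChain pairs)

-- ===== LEMMAS AND PROOFS =====

-- Shared model of both programs: the list of (end, dp-value) pairs of A's DP, built row by row.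
def avOf (r : List Int) : Int := PySem.List.pyGetD r 0 0
def bvOf (r : List Int) : Int := PySem.List.pyGetD r 1 0

def newdp (h : List (Int × Int)) (a : Int) : Int :=
  match h with
  | [] => 1
  | _ :: _ => h.foldl (fun m p => max m (p.2 + if p.1 < a then 1 else 0)) 0

def histFrom (h : List (Int × Int)) (l : List (List Int)) : List (Int × Int) :=
  l.foldl (fun h r => h ++ [(bvOf r, newdp h (avOf r))]) h

def listMax (h : List (Int × Int)) : Int := h.foldl (fun m p => max m p.2) 0

def fmax (f : List (Int × Int)) (a : Int) : Int :=
  f.foldl (fun m p => max m (if p.1 < a then p.2 else 0)) 0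

-- generic facts about folds of the shape  fun m p => max m (g p)
theorem le_foldlMax_init {α : Type} (g : α → Int) (l : List α) (c : Int) :
    c ≤ l.foldl (fun m p => max m (g p)) c := by
  induction l generalizing c with
  | nil => exact le_refl c
  | cons p t ih => exact le_trans (le_max_left c (g p)) (ih _)

theorem le_foldlMax_mem {α : Type} (g : α → Int) (l : List α) (c : Int) {p : α} (hp : p ∈ l) :
    g p ≤ l.foldl (fun m p => max m (g p)) c := by
  induction l generalizing c with
  | nil => cases hp
  | cons q t ih =>
    rcases List.mem_cons.mp hp with h | h
    · subst h; exact le_trans (le_max_right c (g p)) (le_foldlMax_init g t _)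
    · exact ih _ h

theorem foldlMax_le {α : Type} (g : α → Int) (l : List α) (c B : Int) (hc : c ≤ B)
    (hl : ∀ p ∈ l, g p ≤ B) : l.foldl (fun m p => max m (g p)) c ≤ B := by
  induction l generalizing c with
  | nil => exact hc
  | cons p t ih =>
    exact ih _ (max_le hc (hl p (List.mem_cons_self ..))) (fun q hq => hl q (List.mem_cons_of_mem _ hq))

theorem foldlMax_eq_init {α : Type} (g : α → Int) (l : List α) (c : Int)
    (hl : ∀ p ∈ l, g p ≤ c) : l.foldl (fun m p => max m (g p)) c = c := by
  induction l with
  | nil => rfl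
  | cons p t ih =>
    have h1 : max c (g p) = c := max_eq_left (hl p (List.mem_cons_self ..))
    simp only [List.foldl_cons, h1]
    exact ih (fun q hq => hl q (List.mem_cons_of_mem _ hq))

theorem fmax_nonneg (f : List (Int × Int)) (a : Int) : 0 ≤ fmax f a :=
  le_foldlMax_init _ f 0

theorem listMax_nonneg (h : List (Int × Int)) : 0 ≤ listMax h :=
  le_foldlMax_init _ h 0

theorem listMax_le_newdp (h : List (Int × Int)) (a : Int) : listMax h ≤ newdp h a := by
  match h with
  | [] => simp [listMax, newdp]
  | p :: t =>
    show listMax (p :: t) ≤ (p :: t).foldl (fun m p => max m (p.2 + if p.1 < a then 1 else 0)) 0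
    refine foldlMax_le _ _ 0 _ (le_foldlMax_init _ _ 0) (fun q hq => ?_)
    refine le_trans ?_ (le_foldlMax_mem (fun p => p.2 + if p.1 < a then 1 else 0) (p :: t) 0 hq)
    split <;> omega

theorem newdp_eq (h : List (Int × Int)) (a : Int) (hh : ∀ p ∈ h, 1 ≤ p.2) :
    newdp h a = max (listMax h) (fmax h a + 1) := by
  match h with
  | [] => simp [newdp, listMax, fmax]
  | p :: t =>
    set h' : List (Int × Int) := p :: t with hh'
    show h'.foldl (fun m p => max m (p.2 + if p.1 < a then 1 else 0)) 0
        = max (listMax h') (fmax h' a + 1)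
    set N := h'.foldl (fun m p => max m (p.2 + if p.1 < a then 1 else 0)) 0 with hN
    have hNge : ∀ q ∈ h', q.2 + (if q.1 < a then 1 else 0) ≤ N :=
      fun q hq => le_foldlMax_mem (fun p => p.2 + if p.1 < a then 1 else 0) h' 0 hq
    have hN1 : 1 ≤ N := by
      have ha1 := hNge p (List.mem_cons_self ..)
      have ha2 := hh p (List.mem_cons_self ..)
      split at ha1 <;> omega
    refine le_antisymm ?_ (max_le ?_ ?_)
    · refine foldlMax_le _ _ 0 _ (le_trans (listMax_nonneg h') (le_max_left ..)) (fun q hq => ?_)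
      by_cases hqa : q.1 < a
      · have h1 : q.2 ≤ fmax h' a := by
          have := le_foldlMax_mem (fun p => if p.1 < a then p.2 else 0) h' 0 hq
          simpa [hqa] using this
        simp only [hqa, if_true]
        omega
      · have h1 : q.2 ≤ listMax h' := le_foldlMax_mem (fun p => p.2) h' 0 hq
        simp only [hqa, if_false]
        omega
    · exact listMax_le_newdp h' a
    · have h1 : fmax h' a ≤ N - 1 := by
        refine foldlMax_le _ _ 0 _ (by omega) (fun q hq => ?_)
        by_cases hqa : q.1 < a
        · have := hNge q hq
          simp only [hqa, if_true] at this ⊢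
          omega
        · simp only [hqa, if_false]
          omega
      omega

theorem listMax_append_singleton (h : List (Int × Int)) (p : Int × Int) :
    listMax (h ++ [p]) = max (listMax h) p.2 := by
  simp [listMax, List.foldl_append]

theorem fmax_append_singleton (h : List (Int × Int)) (p : Int × Int) (a : Int) :
    fmax (h ++ [p]) a = max (fmax h a) (if p.1 < a then p.2 else 0) := by
  simp [fmax, List.foldl_append]

-- nondecreasing, nonnegative second components: the running max is the last entry
theorem listMax_eq_last (t : List (Int × Int))
    (hm : t.Pairwise (fun p q => p.2 ≤ q.2)) (h0 : ∀ p ∈ t, 0 ≤ p.2) :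
    listMax t = (t.getD (t.length - 1) (0, 0)).2 := by
  induction t using List.reverseRecOn with
  | nil => rfl
  | append_singleton t p ih =>
    rw [listMax_append_singleton]
    have hlast : ((t ++ [p]).getD (t.length + 1 - 1) (0, 0)).2 = p.2 := by
      rw [(by omega : t.length + 1 - 1 = t.length),
        List.getD_append_right _ _ _ _ (le_refl t.length)]
      simp
    simp only [List.length_append, List.length_cons, List.length_nil, Nat.zero_add, hlast]
    have hle : listMax t ≤ p.2 := by
      refine foldlMax_le _ _ 0 _ ?_ (fun q hq => ?_)
      · rcases List.pairwise_append.mp hm with ⟨-, -, hcross⟩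
        rcases t with - | ⟨q, t'⟩
        · exact h0 p (by simp)
        · exact le_trans (h0 q (by simp)) (hcross q (by simp) p (by simp))
      · rcases List.pairwise_append.mp hm with ⟨-, -, hcross⟩
        exact hcross q hq p (by simp)
    omega

-- histFrom basics
theorem histFrom_append (h : List (Int × Int)) (l : List (List Int)) (r : List Int) :
    histFrom h (l ++ [r]) = histFrom h l ++ [(bvOf r, newdp (histFrom h l) (avOf r))] := by
  simp [histFrom, List.foldl_append]

theorem length_histFrom (h : List (Int × Int)) (l : List (List Int)) :
    (histFrom h l).length = h.length + l.length := by
  induction l generalizing h with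
  | nil => simp [histFrom]
  | cons r t ih =>
    have : histFrom h (r :: t) = histFrom (h ++ [(bvOf r, newdp h (avOf r))]) t := rfl
    rw [this, ih]
    simp
    omega

theorem hist_getD_fst (l : List (List Int)) (j : ℕ) (hj : j < l.length) :
    ((histFrom [] l).getD j (0, 0)).1 = bvOf (l.getD j []) := by
  induction l using List.reverseRecOn with
  | nil => simp at hj
  | append_singleton t r ih =>
    rw [histFrom_append]
    have hlen : (histFrom [] t).length = t.length := by simpa using length_histFrom [] t
    by_cases hjt : j < t.length
    · rw [List.getD_append _ _ _ _ (by omega), List.getD_append _ _ _ _ hjt]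
      exact ih hjt
    · have hj' : j = t.length := by
        simp only [List.length_append, List.length_cons, List.length_nil] at hj
        omega
      subst hj'
      rw [List.getD_append_right _ _ _ _ (by omega), List.getD_append_right _ _ _ _ (by omega)]
      simp [hlen]

theorem listMax_hist_last (l : List (List Int)) :
    listMax (histFrom [] l) = ((histFrom [] l).map Prod.snd).getD (l.length - 1) 0 := by
  induction l using List.reverseRecOn with
  | nil => rfl
  | append_singleton t r ih =>
    rw [histFrom_append, listMax_append_singleton]
    have hlen : (histFrom [] t).length = t.length := by simpa using length_histFrom [] t
    have hmax : max (listMax (histFrom [] t)) (newdp (histFrom [] t) (avOf r))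
        = newdp (histFrom [] t) (avOf r) :=
      max_eq_right (listMax_le_newdp _ _)
    rw [hmax, List.map_append]
    rw [List.getD_append_right _ _ _ _ (by simp [hlen])]
    simp [hlen]

-- ===== binary search correctness =====
theorem pyGetD_toNat {α : Type} (f : List α) (d : α) {j : Int} (h0 : 0 ≤ j)
    (h1 : j < (f.length : Int)) : PySem.List.pyGetD f j d = f.getD j.toNat d := by
  rw [PySem.List.pyGetD_eq_getElem f d h0 h1, List.getD_eq_getElem _ _ (by omega)]

theorem pyGetD_fst_mono (f : List (Int × Int))
    (hs : f.Pairwise (fun p q => p.1 ≤ q.1)) {i j : Int} (h0 : 0 ≤ i) (hij : i ≤ j)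
    (hj : j < (f.length : Int)) :
    (PySem.List.pyGetD f i (0, 0)).1 ≤ (PySem.List.pyGetD f j (0, 0)).1 := by
  rcases eq_or_lt_of_le hij with h | h
  · rw [h]
  · rw [PySem.List.pyGetD_eq_getElem f (0, 0) h0 (by omega),
      PySem.List.pyGetD_eq_getElem f (0, 0) (by omega) hj]
    exact List.pairwise_iff_getElem.mp hs i.toNat j.toNat (by omega) (by omega) (by omega)

theorem firstGeAux_spec (f : List (Int × Int)) (x : Int)
    (hs : f.Pairwise (fun p q => p.1 ≤ q.1)) :
    ∀ (fuel : ℕ) (lo hi : Int), (hi - lo).toNat ≤ fuel → 0 ≤ lo → lo ≤ hi → hi ≤ (f.length : Int) →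
      lo ≤ firstGeAux f x lo hi ∧ firstGeAux f x lo hi ≤ hi ∧
      (∀ j : Int, lo ≤ j → j < firstGeAux f x lo hi → (PySem.List.pyGetD f j (0, 0)).1 < x) ∧
      (∀ j : Int, firstGeAux f x lo hi ≤ j → j < hi → ¬ (PySem.List.pyGetD f j (0, 0)).1 < x) := by
  intro fuel
  induction fuel with
  | zero =>
    intro lo hi hf h0 hlh hhl
    rw [firstGeAux, dif_neg (by omega : ¬ lo < hi)]
    exact ⟨le_refl _, by omega, fun j h1 h2 => by omega, fun j h1 h2 => by omega⟩
  | succ n ih =>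
    intro lo hi hf h0 hlh hhl
    rw [firstGeAux]
    by_cases h : lo < hi
    · rw [dif_pos h]
      have hm2 : PySem.Int.floordiv (lo + hi) 2 = (lo + hi) / 2 :=
        PySem.Int.floordiv_eq_ediv_of_pos (by omega)
      by_cases hc : (PySem.List.pyGetD f (PySem.Int.floordiv (lo + hi) 2) (0, 0)).1 < x
      · rw [if_pos hc]
        obtain ⟨ih1, ih2, ih3, ih4⟩ :=
          ih (PySem.Int.floordiv (lo + hi) 2 + 1) hi (by omega) (by omega) (by omega) hhl
        refine ⟨by omega, ih2, ?_, ih4⟩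
        intro j hj1 hj2
        by_cases hjm : j ≤ PySem.Int.floordiv (lo + hi) 2
        · exact lt_of_le_of_lt (pyGetD_fst_mono f hs (by omega) hjm (by omega)) hc
        · exact ih3 j (by omega) hj2
      · rw [if_neg hc]
        obtain ⟨ih1, ih2, ih3, ih4⟩ :=
          ih lo (PySem.Int.floordiv (lo + hi) 2) (by omega) h0 (by omega) (by omega)
        refine ⟨ih1, by omega, ih3, ?_⟩
        intro j hj1 hj2 hjx
        by_cases hjm : j < PySem.Int.floordiv (lo + hi) 2
        · exact ih4 j hj1 hjm hjx
        · exact hc (lt_of_le_of_lt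
            (pyGetD_fst_mono f hs (by omega) (by omega) (by omega)) hjx)
    · rw [dif_neg h]
      exact ⟨le_refl _, by omega, fun j h1 h2 => by omega, fun j h1 h2 => by omega⟩

theorem firstGe_spec (f : List (Int × Int)) (x : Int)
    (hs : f.Pairwise (fun p q => p.1 ≤ q.1)) :
    0 ≤ firstGe f x ∧ firstGe f x ≤ (f.length : Int) ∧
    (∀ j : ℕ, (j : Int) < firstGe f x → (f.getD j (0, 0)).1 < x) ∧
    (∀ j : ℕ, firstGe f x ≤ (j : Int) → j < f.length → ¬ (f.getD j (0, 0)).1 < x) := by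
  obtain ⟨h1, h2, h3, h4⟩ := firstGeAux_spec f x hs ((f.length : Int) - 0).toNat 0 (f.length : Int)
    (by omega) (by omega) (by exact_mod_cast Int.natCast_nonneg f.length) (le_refl _)
  rw [firstGe]
  refine ⟨h1, h2, ?_, ?_⟩
  · intro j hj
    have := h3 (j : Int) (by omega) hj
    rwa [pyGetD_toNat f (0,0) (by omega) (by omega), Int.toNat_natCast] at this
  · intro j hj1 hj2
    have := h4 (j : Int) hj1 (by exact_mod_cast hj2)
    rwa [pyGetD_toNat f (0,0) (by omega) (by exact_mod_cast hj2), Int.toNat_natCast] at this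

-- ===== A-side characterization =====
def Abody (ps : List (List Int)) : List Int → Int → List Int :=
  fun dp i => (PySem.List.pyRange 0 i).foldl (fun dp j =>
    PySem.List.pySetD dp i (max (PySem.List.pyGetD dp i 0)
      (PySem.List.pyGetD dp j 0 +
        (if PySem.List.pyGetD (PySem.List.pyGetD ps j []) 1 0 <
            PySem.List.pyGetD (PySem.List.pyGetD ps i []) 0 0 then 1 else 0)))) dp

theorem inner_shift (i : Int) (c : Int → Int) :
    ∀ (js : List Int) (L : List Int), 0 ≤ i → i < (L.length : Int) → (∀ j ∈ js, 0 ≤ j ∧ j < i) →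
      js.foldl (fun dp j => PySem.List.pySetD dp i (max (PySem.List.pyGetD dp i 0)
          (PySem.List.pyGetD dp j 0 + c j))) L
        = L.set i.toNat (js.foldl (fun m j => max m (PySem.List.pyGetD L j 0 + c j))
            (PySem.List.pyGetD L i 0)) := by
  intro js
  induction js with
  | nil =>
    intro L h0 hiL _
    simp only [List.foldl_nil]
    rw [PySem.List.pyGetD_eq_getElem L 0 h0 hiL]
    exact (List.set_getElem_self (by omega)).symm
  | cons j js ih =>
    intro L h0 hiL hjs
    obtain ⟨hj0, hji⟩ := hjs j (List.mem_cons_self ..)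
    simp only [List.foldl_cons]
    rw [PySem.List.pySetD_of_nonneg L _ h0]
    have hset : ∀ v : Int, ∀ j' : Int, 0 ≤ j' → j' < i →
        PySem.List.pyGetD (L.set i.toNat v) j' 0 = PySem.List.pyGetD L j' 0 := by
      intro v j' h0' hj'
      rw [pyGetD_toNat _ 0 h0' (by simp; omega), pyGetD_toNat _ 0 h0' (by omega),
        List.getD_eq_getElem _ _ (by simp; omega), List.getD_eq_getElem _ _ (by omega)]
      exact List.getElem_set_ne (by omega) _
    have hgeti : ∀ v : Int,
        PySem.List.pyGetD (L.set i.toNat v) i 0 = v := by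
      intro v
      rw [pyGetD_toNat _ 0 h0 (by simp; omega), List.getD_eq_getElem _ _ (by simp; omega)]
      exact List.getElem_set_self _
    rw [ih (L.set i.toNat _) h0 (by simp; omega) (fun q hq => hjs q (List.mem_cons_of_mem _ hq))]
    rw [hgeti, List.set_set]
    congr 1
    refine PySem.List.foldl_congr_mem js _ _ _ (fun acc j' hj' => ?_)
    obtain ⟨hj0', hji'⟩ := hjs j' (List.mem_cons_of_mem _ hj')
    rw [hset _ j' hj0' hji']

theorem foldl_eq_newdp (h : List (Int × Int)) (hne : h ≠ []) (a : Int) :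
    h.foldl (fun m p => max m (p.2 + if p.1 < a then 1 else 0)) 0 = newdp h a := by
  cases h with
  | nil => exact absurd rfl hne
  | cons p t => rfl

theorem A_outer (ps : List (List Int)) (k : ℕ) (hk1 : 1 ≤ k) (hk2 : k ≤ ps.length) :
    (PySem.List.pyRange 1 (k : Int)).foldl (Abody ps) (1 :: List.replicate (ps.length - 1) 0)
      = (histFrom [] (ps.take k)).map Prod.snd ++ List.replicate (ps.length - k) 0 := by
  revert hk2
  induction k, hk1 using Nat.le_induction with
  | base =>
    intro hk2
    rw [show ((1 : ℕ) : Int) = 1 by norm_num, PySem.List.pyRange_one_eq_nil (le_refl 1)]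
    rcases ps with - | ⟨r, t⟩
    · simp at hk2
    · simp only [List.foldl_nil]
      rw [show (r :: t).take 1 = [r] from rfl,
        show histFrom [] [r] = [(bvOf r, 1)] from rfl]
      simp
  | succ k hk ih =>
    intro hk2
    have hklen : k < ps.length := by omega
    rw [show (((k + 1 : ℕ)) : Int) = (k : Int) + 1 by push_cast; ring,
      PySem.List.pyRange_one_succ_right (by exact_mod_cast hk : (1 : Int) ≤ (k : Int)),
      List.foldl_append, ih (by omega)]
    simp only [List.foldl_cons, List.foldl_nil]
    set Hk := histFrom [] (ps.take k) with hHk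
    have hlenHk : Hk.length = k := by
      rw [hHk]
      have := length_histFrom [] (ps.take k)
      simpa [List.length_take, Nat.min_eq_left (show k ≤ ps.length by omega)] using this
    set D := Hk.map Prod.snd with hD
    have hlenD : D.length = k := by simp [hD, hlenHk]
    set L := D ++ List.replicate (ps.length - k) 0 with hL
    have hlenL : L.length = ps.length := by
      rw [hL]; simp [hlenD]; omega
    show Abody ps L (k : Int) = _
    unfold Abody
    have hshift := inner_shift (k : Int)
      (fun j => if PySem.List.pyGetD (PySem.List.pyGetD ps j []) 1 0 <
          PySem.List.pyGetD (PySem.List.pyGetD ps ((k : ℕ) : Int) []) 0 0 then 1 else 0)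
      (PySem.List.pyRange 0 (k : Int)) L (by omega)
      (by rw [hlenL]; exact_mod_cast hklen)
      (fun j hj => by
        rw [PySem.List.mem_pyRange_one] at hj
        exact ⟨hj.1, hj.2⟩)
    beta_reduce at hshift
    rw [hshift]
    have htop : PySem.List.pyGetD L ((k : ℕ) : Int) 0 = 0 := by
      rw [pyGetD_toNat L 0 (by omega) (by rw [hlenL]; exact_mod_cast hklen),
        Int.toNat_natCast, hL, List.getD_append_right _ _ _ _ (by omega),
        show ps.length - k = (ps.length - (k + 1)) + 1 by omega, List.replicate_succ]
      simp [hlenD]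
    have hbody : ∀ (m : Int), ∀ j ∈ PySem.List.pyRange 0 (k : Int),
        max m (PySem.List.pyGetD L j 0 +
          if PySem.List.pyGetD (PySem.List.pyGetD ps j []) 1 0 <
            PySem.List.pyGetD (PySem.List.pyGetD ps ((k : ℕ) : Int) []) 0 0 then 1 else 0)
        = max m ((PySem.List.pyGetD Hk j (0, 0)).2 +
          if (PySem.List.pyGetD Hk j (0, 0)).1 <
            PySem.List.pyGetD (PySem.List.pyGetD ps ((k : ℕ) : Int) []) 0 0 then 1 else 0) := by
      intro m j hj
      rw [PySem.List.mem_pyRange_one] at hj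
      obtain ⟨hj0, hjk⟩ := hj
      have hjN : j.toNat < k := by omega
      have h1 : PySem.List.pyGetD L j 0 = (PySem.List.pyGetD Hk j (0, 0)).2 := by
        rw [pyGetD_toNat L 0 hj0 (by omega), pyGetD_toNat Hk (0, 0) hj0 (by omega)]
        rw [hL, List.getD_append _ _ _ _ (by omega), hD]
        rw [List.getD_eq_getElem _ _ (by simp [hlenHk]; omega),
          List.getD_eq_getElem _ _ (by omega), List.getElem_map]
      have h2 : PySem.List.pyGetD (PySem.List.pyGetD ps j []) 1 0
          = (PySem.List.pyGetD Hk j (0, 0)).1 := by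
        rw [pyGetD_toNat ps [] hj0 (by exact_mod_cast (by omega : j < (ps.length : Int))),
          pyGetD_toNat Hk (0, 0) hj0 (by omega), hHk]
        have h3 := hist_getD_fst (ps.take k) j.toNat
          (by rw [List.length_take]; omega)
        have h4 : (ps.take k).getD j.toNat [] = ps.getD j.toNat [] := by
          simp [List.getD_eq_getElem?_getD, List.getElem?_take_of_lt hjN]
        rw [h3, h4]
        rfl
      rw [h1, h2]
    rw [PySem.List.foldl_congr_mem _ _ _ _ hbody, htop]
    rw [show ((k : ℕ) : Int) = ((Hk.length : ℕ) : Int) from by rw [hlenHk]]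
    rw [PySem.List.foldl_pyRange_zero_pyGetD' Hk (0, 0)
      (fun m p => max m (p.2 +
        if p.1 < PySem.List.pyGetD (PySem.List.pyGetD ps ((Hk.length : ℕ) : Int) []) 0 0
        then 1 else 0)) 0]
    have hne : Hk ≠ [] := by
      intro hnil
      rw [hnil] at hlenHk
      simp at hlenHk
      omega
    rw [foldl_eq_newdp Hk hne]
    have hav : PySem.List.pyGetD ps ((Hk.length : ℕ) : Int) [] = ps.getD k [] := by
      rw [pyGetD_toNat ps [] (by omega) (by rw [hlenHk]; exact_mod_cast hklen),
        Int.toNat_natCast, hlenHk]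
    have htake : ps.take (k + 1) = ps.take k ++ [ps.getD k []] := by
      have hg : ps.getD k [] = ps[k] := List.getD_eq_getElem _ _ hklen
      rw [List.take_add_one, List.getElem?_eq_getElem hklen, hg]
      rfl
    rw [htake, histFrom_append, ← hHk]
    rw [show avOf (ps.getD k []) = PySem.List.pyGetD (ps.getD k []) 0 0 from rfl, ← hav]
    rw [List.map_append, Int.toNat_natCast, hlenHk]
    rw [hL, show ps.length - k = (ps.length - (k + 1)) + 1 by omega, List.replicate_succ]
    rw [show k = D.length from hlenD.symm]
    simp
    rfl

theorem A_eq (pairs : List (List Int)) (h2 : 2 ≤ pairs.length) :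
    findLongestChain pairs = listMax (histFrom [] (PySem.List.sorted pairs (fun x => x) false)) := by
  have hn : ¬ ((pairs.length : Int) < 2) := by exact_mod_cast not_lt.mpr (by exact_mod_cast h2)
  simp only [findLongestChain]
  rw [if_neg hn]
  set ps := PySem.List.sorted pairs (fun x => x) false with hps
  have hlps : ps.length = pairs.length := PySem.List.length_sorted pairs _ _
  have houter := A_outer ps ps.length (by omega) (le_refl _)
  rw [List.take_length, Nat.sub_self, List.replicate_zero, List.append_nil] at houter
  have h2' : 2 ≤ ps.length := by omega
  show PySem.List.pyGetD ((PySem.List.pyRange 1 (pairs.length : Int)).foldl (Abody ps)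
    (1 :: List.replicate (pairs.length - 1) 0)) ((pairs.length : Int) - 1) 0 = _
  rw [← hlps, houter]
  have hlh : (histFrom [] ps).length = ps.length := by
    simpa using length_histFrom [] ps
  rw [pyGetD_toNat _ 0 (by omega) (by rw [List.length_map, hlh]; omega)]
  rw [show ((ps.length : Int) - 1).toNat = ps.length - 1 by omega]
  exact (listMax_hist_last ps).symm

-- ===== B-side characterization =====
def Bstep : Int × List (Int × Int) → List Int → Int × List (Int × Int) :=
  fun st p =>
    let a := PySem.List.pyGetD p 0 0
    let b := PySem.List.pyGetD p 1 0
    let i := firstGe st.2 a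
    let q := if 0 < i then (PySem.List.pyGetD st.2 (i - 1) (0, 0)).2 else 0
    let best := max st.1 (q + 1)
    (best, PySem.List.slice st.2 none (some (firstGe st.2 b)) ++ [(b, best)])

def BInv (h : List (Int × Int)) (best : Int) (f : List (Int × Int)) : Prop :=
  best = listMax h ∧ (∀ p ∈ h, 1 ≤ p.2) ∧
  f.Pairwise (fun p q => p.1 ≤ q.1) ∧ f.Pairwise (fun p q => p.2 ≤ q.2) ∧
  (∀ p ∈ f, 1 ≤ p.2 ∧ p.2 ≤ best) ∧ (∀ a, fmax f a = fmax h a)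

theorem query_eq_fmax (f : List (Int × Int)) (a : Int)
    (h1 : f.Pairwise (fun p q => p.1 ≤ q.1)) (h2 : f.Pairwise (fun p q => p.2 ≤ q.2))
    (h3 : ∀ p ∈ f, 1 ≤ p.2) :
    (if 0 < firstGe f a then (PySem.List.pyGetD f (firstGe f a - 1) (0, 0)).2 else 0)
      = fmax f a := by
  obtain ⟨hr0, hrlen, hpre, hsuf⟩ := firstGe_spec f a h1
  set r := firstGe f a with hr
  have hdropn : ∀ p ∈ f.drop r.toNat, ¬ p.1 < a := by
    intro p hp
    obtain ⟨i, hi, hpi⟩ := List.mem_iff_getElem.mp hp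
    have hlen : r.toNat + i < f.length := by
      simp [List.length_drop] at hi
      omega
    have := hsuf (r.toNat + i) (by omega) hlen
    rw [List.getD_eq_getElem _ _ hlen] at this
    rw [← hpi, List.getElem_drop]
    exact this
  have hsplit : fmax f a = (f.drop r.toNat).foldl
      (fun m p => max m (if p.1 < a then p.2 else 0))
      ((f.take r.toNat).foldl (fun m p => max m (if p.1 < a then p.2 else 0)) 0) := by
    rw [fmax, ← List.foldl_append, List.take_append_drop]
  have hdrop : fmax f a
      = (f.take r.toNat).foldl (fun m p => max m (if p.1 < a then p.2 else 0)) 0 := by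
    rw [hsplit]
    refine foldlMax_eq_init _ _ _ (fun p hp => ?_)
    rw [if_neg (hdropn p hp)]
    exact le_foldlMax_init _ _ _
  by_cases hr0' : 0 < r
  · rw [if_pos hr0']
    have htq : ∀ p ∈ f.take r.toNat, (if p.1 < a then p.2 else 0) = p.2 := by
      intro p hp
      obtain ⟨i, hi, hpi⟩ := List.mem_iff_getElem.mp hp
      have hik : i < r.toNat := by simp [List.length_take] at hi; omega
      have hilen : i < f.length := by
        have := List.length_take_le r.toNat f
        simp [List.length_take] at hi
        omega
      have := hpre i (by omega)
      rw [List.getD_eq_getElem _ _ hilen] at this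
      rw [← hpi, List.getElem_take]
      exact if_pos this
    rw [hdrop, PySem.List.foldl_congr_mem _ _ (fun m p => max m p.2) 0
      (fun acc p hp => by rw [htq p hp])]
    have hlt : (f.take r.toNat).length = r.toNat := by
      simp [List.length_take]
      omega
    have hlast := listMax_eq_last (f.take r.toNat)
      (h2.sublist (List.take_sublist _ _))
      (fun p hp => le_trans (by omega) (h3 p (List.take_subset _ _ hp)))
    rw [listMax] at hlast
    rw [hlast, hlt]
    have hrlast : r.toNat - 1 < f.length := by omega
    have hgtake : (f.take r.toNat).getD (r.toNat - 1) (0, 0) = f.getD (r.toNat - 1) (0, 0) := by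
      simp [List.getD_eq_getElem?_getD, List.getElem?_take_of_lt (show r.toNat - 1 < r.toNat by omega)]
    rw [hgtake, pyGetD_toNat f (0, 0) (by omega) (by omega),
      show (r - 1).toNat = r.toNat - 1 by omega]
  · rw [if_neg hr0']
    have hrz : r.toNat = 0 := by omega
    rw [hdrop, hrz]
    rfl

theorem step_inv (h : List (Int × Int)) (best : Int) (f : List (Int × Int)) (r : List Int)
    (hInv : BInv h best f) :
    (Bstep (best, f) r).1 = newdp h (avOf r) ∧
    BInv (h ++ [(bvOf r, newdp h (avOf r))]) (Bstep (best, f) r).1 (Bstep (best, f) r).2 := by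
  obtain ⟨hI1, hI2, hI3, hI4, hI5, hI6⟩ := hInv
  have hsnd1 : ∀ p ∈ f, 1 ≤ p.2 := fun p hp => (hI5 p hp).1
  have hsndb : ∀ p ∈ f, p.2 ≤ best := fun p hp => (hI5 p hp).2
  set a := avOf r with ha
  set b := bvOf r with hb
  have hq : (if 0 < firstGe f a then (PySem.List.pyGetD f (firstGe f a - 1) (0, 0)).2 else 0)
      = fmax f a := query_eq_fmax f a hI3 hI4 hsnd1
  have hstep1 : (Bstep (best, f) r).1 = max best (fmax f a + 1) := by
    simp only [Bstep]
    rw [show PySem.List.pyGetD r 0 0 = a from rfl, hq]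
  have hd : newdp h a = max best (fmax f a + 1) := by
    rw [newdp_eq h a hI2, hI1, hI6 a]
  have hfirst : (Bstep (best, f) r).1 = newdp h a := by rw [hstep1, hd]
  refine ⟨hfirst, ?_⟩
  set best' := (Bstep (best, f) r).1 with hbest'
  have hbb' : best ≤ best' := by rw [hstep1]; exact le_max_left _ _
  have hb'1 : 1 ≤ best' := by
    rw [hstep1]
    have := fmax_nonneg f a
    have := le_max_right best (fmax f a + 1)
    omega
  obtain ⟨hk0, hklen, hkpre, hksuf⟩ := firstGe_spec f b hI3
  have hf2 : (Bstep (best, f) r).2 = f.take (firstGe f b).toNat ++ [(b, best')] := by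
    show (PySem.List.slice f none (some (firstGe f (PySem.List.pyGetD r 1 0))) ++
      [(PySem.List.pyGetD r 1 0, _)] : List (Int × Int)) = _
    rw [show PySem.List.pyGetD r 1 0 = b from rfl, PySem.List.slice_to f hk0]
    rfl
  set kb := (firstGe f b).toNat with hkb
  have htmem : ∀ p ∈ f.take kb, p.1 < b := by
    intro p hp
    obtain ⟨i, hi, hpi⟩ := List.mem_iff_getElem.mp hp
    have hik : i < kb := by simp [List.length_take] at hi; omega
    have hilen : i < f.length := by simp [List.length_take] at hi; omega
    have := hkpre i (by omega)
    rw [List.getD_eq_getElem _ _ hilen] at this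
    rw [← hpi, List.getElem_take]
    exact this
  have hdmem : ∀ p ∈ f.drop kb, ¬ p.1 < b := by
    intro p hp
    obtain ⟨i, hi, hpi⟩ := List.mem_iff_getElem.mp hp
    have hlen : kb + i < f.length := by simp [List.length_drop] at hi; omega
    have := hksuf (kb + i) (by omega) hlen
    rw [List.getD_eq_getElem _ _ hlen] at this
    rw [← hpi, List.getElem_drop]
    exact this
  rw [hf2]
  refine ⟨?_, ?_, ?_, ?_, ?_, ?_⟩
  · rw [listMax_append_singleton]
    simp only
    rw [← hI1, ← hfirst]
    exact (max_eq_right hbb').symm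
  · intro p hp
    rcases List.mem_append.mp hp with hp1 | hp1
    · exact hI2 p hp1
    · have : p = (b, newdp h a) := by simpa using hp1
      rw [this]
      rw [hd]
      simp only
      have := fmax_nonneg f a
      have := le_max_right best (fmax f a + 1)
      omega
  · rw [List.pairwise_append]
    refine ⟨hI3.sublist (List.take_sublist _ _), List.pairwise_singleton _ _, ?_⟩
    intro p hp q hq
    rw [List.mem_singleton.mp hq]
    exact le_of_lt (htmem p hp)
  · rw [List.pairwise_append]
    refine ⟨hI4.sublist (List.take_sublist _ _), List.pairwise_singleton _ _, ?_⟩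
    intro p hp q hq
    rw [List.mem_singleton.mp hq]
    exact le_trans (hsndb p (List.take_subset _ _ hp)) hbb'
  · intro p hp
    rcases List.mem_append.mp hp with hp1 | hp1
    · exact ⟨(hI5 p (List.take_subset _ _ hp1)).1,
        le_trans (hsndb p (List.take_subset _ _ hp1)) hbb'⟩
    · have : p = (b, best') := by simpa using hp1
      rw [this]
      exact ⟨hb'1, le_refl _⟩
  · intro a'
    have hsingle : ((bvOf r, newdp h (avOf r)) : Int × Int) = (b, best') := by rw [← hfirst]
    rw [hsingle, fmax_append_singleton, fmax_append_singleton]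
    simp only
    have hfh : fmax f a' = fmax h a' := hI6 a'
    by_cases hba : b < a'
    · rw [if_pos hba]
      have h1' : fmax (f.take kb) a' ≤ best' := by
        refine foldlMax_le _ _ 0 _ (by omega) (fun p hp => ?_)
        split
        · exact le_trans (hsndb p (List.take_subset _ _ hp)) hbb'
        · omega
      have h2' : fmax h a' ≤ best' := by
        rw [← hfh]
        refine foldlMax_le _ _ 0 _ (by omega) (fun p hp => ?_)
        split
        · exact le_trans (hsndb p hp) hbb'
        · omega
      rw [max_eq_right h1', max_eq_right h2']
    · rw [if_neg hba]
      rw [max_eq_left (fmax_nonneg _ _), max_eq_left (fmax_nonneg _ _), ← hfh]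
      have : fmax f a' = (f.drop kb).foldl (fun m p => max m (if p.1 < a' then p.2 else 0))
          (fmax (f.take kb) a') := by
        rw [fmax, fmax, ← List.foldl_append, List.take_append_drop]
      rw [this]
      refine (foldlMax_eq_init _ _ _ (fun p hp => ?_)).symm
      rw [if_neg (fun hlt => (hdmem p hp) (lt_of_lt_of_le hlt (not_lt.mp hba)))]
      exact fmax_nonneg _ _

theorem B_main : ∀ (l : List (List Int)) (h : List (Int × Int)) (best : Int)
    (f : List (Int × Int)), BInv h best f →
    (l.foldl Bstep (best, f)).1 = listMax (histFrom h l) := by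
  intro l
  induction l with
  | nil => intro h best f hInv; exact hInv.1
  | cons r t ih =>
    intro h best f hInv
    obtain ⟨h1, h2⟩ := step_inv h best f r hInv
    show (t.foldl Bstep (Bstep (best, f) r)).1 = listMax (histFrom (h ++ [(bvOf r, newdp h (avOf r))]) t)
    rw [← Prod.mk.eta (p := Bstep (best, f) r)]
    exact ih _ _ _ h2

theorem B_eq (pairs : List (List Int)) (h2 : 2 ≤ pairs.length) :
    findLongestChain_alt pairs = listMax (histFrom [] (PySem.List.sorted pairs (fun x => x) false)) := by
  have hn : ¬ ((pairs.length : Int) < 2) := by exact_mod_cast not_lt.mpr (by exact_mod_cast h2)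
  simp only [findLongestChain_alt]
  rw [if_neg hn]
  show ((PySem.List.sorted pairs (fun x => x) false).foldl Bstep (0, [])).1 = _
  refine B_main _ [] 0 [] ?_
  refine ⟨rfl, by simp, List.Pairwise.nil, List.Pairwise.nil, by simp, fun a => rfl⟩

-- ===== VERDICT (by name: the statement is the Claim_ definition above) =====
theorem findLongestChain_spec : Claim_equal_findLongestChain := by
  intro pairs _hdom _hpre
  unfold Spec_findLongestChain
  by_cases h : pairs.length < 2
  · have h1 : pairs.length ≤ 1 := by omega
    simp [findLongestChain, findLongestChain_alt, h1]
  · rw [A_eq pairs (by omega), B_eq pairs (by omega)]
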